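-- pv_equiv track=rewrite | github.com/aiyl/automated_assessment_of_3d_models | import_obj.py | check
-- ===== SOURCE A (Python) =====
-- def check(edges1, edges2):
--     boolean = False
--     for n in range(len(edges1)):
--         for m in range(len(edges2)):
--             for k in range(len(edges2[m]) - 1):
--                 if (edges2[m][k] == edges1[n][k] and edges2[m][k + 1] == edges1[n][k + 1]) or (
--                         edges2[m][k] == edges1[n][k + 1] and edges2[m][k + 1] == edges1[n][k]):
--                     # return edges2[m]
--                     boolean = True
--                     return boolean
--     return boolean
-- ===== SOURCE B (Python) =====
-- def check(edges1, edges2):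
--     pairs = set()
--     for e in edges1:
--         for k in range(len(e) - 1):
--             pairs.add((k, e[k], e[k + 1]))
--             pairs.add((k, e[k + 1], e[k]))
--     return any((k, e[k], e[k + 1]) in pairs
--                for e in edges2 for k in range(len(e) - 1))
-- ===== Notes on version B (the rewrite author's own statement) =====
-- stated objective: alternative
-- what changed: Replaces the triple nested scan (every edges1 row against every edges2 row at every position) by a hash index: all (position, value, value) adjacent pairs of edges1, in both orientations, go into a set built once, then edges2 is scanned once with membership tests.
import Mathlib
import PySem

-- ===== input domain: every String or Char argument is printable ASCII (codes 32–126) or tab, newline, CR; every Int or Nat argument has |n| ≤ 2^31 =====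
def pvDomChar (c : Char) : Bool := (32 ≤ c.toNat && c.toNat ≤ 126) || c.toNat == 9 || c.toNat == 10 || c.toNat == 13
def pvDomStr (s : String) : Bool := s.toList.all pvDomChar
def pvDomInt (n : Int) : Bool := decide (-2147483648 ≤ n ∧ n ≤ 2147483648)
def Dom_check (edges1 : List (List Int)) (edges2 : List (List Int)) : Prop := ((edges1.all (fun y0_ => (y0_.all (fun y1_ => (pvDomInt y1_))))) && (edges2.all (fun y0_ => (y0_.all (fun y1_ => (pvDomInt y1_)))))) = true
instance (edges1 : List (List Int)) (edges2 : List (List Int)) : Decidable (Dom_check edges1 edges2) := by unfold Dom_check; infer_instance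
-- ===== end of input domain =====

-- B replaces A's triple nested scan by a set of (position, value, value) adjacent pairs
-- built once from edges1, then a single membership scan of edges2 (objective: alternative).

-- ===== PORT A =====
-- triple nested loop with early return on the first aligned / reversed adjacent pair;
-- list indexing is `getD` (exact on Pre_, where every access Python makes is in range)
def check (edges1 : List (List Int)) (edges2 : List (List Int)) : Bool :=
  (List.range edges1.length).any fun n =>
    (List.range edges2.length).any fun m =>
      (List.range ((edges2.getD m []).length - 1)).any fun k =>
        ((edges2.getD m []).getD k 0 == (edges1.getD n []).getD k 0 &&
          (edges2.getD m []).getD (k+1) 0 == (edges1.getD n []).getD (k+1) 0) ||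
        ((edges2.getD m []).getD k 0 == (edges1.getD n []).getD (k+1) 0 &&
          (edges2.getD m []).getD (k+1) 0 == (edges1.getD n []).getD k 0)

-- ===== PORT B =====
-- the set of (k, e[k], e[k+1]) and (k, e[k+1], e[k]) triples over all e in edges1
def pvPairs (edges1 : List (List Int)) : PySem.Set (Nat × Int × Int) :=
  edges1.foldl (fun s e =>
    (List.range (e.length - 1)).foldl (fun s k =>
      PySem.Set.add (PySem.Set.add s (k, e.getD k 0, e.getD (k+1) 0))
        (k, e.getD (k+1) 0, e.getD k 0)) s)
    PySem.Set.empty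

def check_alt (edges1 : List (List Int)) (edges2 : List (List Int)) : Bool :=
  let pairs := pvPairs edges1
  edges2.any fun e =>
    (List.range (e.length - 1)).any fun k =>
      PySem.Set.contains pairs (k, e.getD k 0, e.getD (k+1) 0)

-- ===== PRECONDITION & SPEC =====
-- an aligned or reversed adjacent-pair match at row n of edges1, row m of edges2, position k
-- (both accesses to the edges1 row in range; the position bound on the edges2 row is imposed
-- where pvMatchB is used)
def pvMatchB (edges1 edges2 : List (List Int)) (n m k : Nat) : Bool :=
  decide (k + 1 < (edges1.getD n []).length) &&
  (((edges2.getD m []).getD k 0 == (edges1.getD n []).getD k 0 &&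
      (edges2.getD m []).getD (k+1) 0 == (edges1.getD n []).getD (k+1) 0) ||
   ((edges2.getD m []).getD k 0 == (edges1.getD n []).getD (k+1) 0 &&
      (edges2.getD m []).getD (k+1) 0 == (edges1.getD n []).getD k 0))

-- Pre_ holds exactly when Python A returns normally: whenever A's n,m,k scan would read an
-- edges1 row past its end (IndexError), a matching pair occurs strictly earlier in that scan
-- order (lexicographically on (n,m,k)), so A returns True before reaching it; only raising
-- inputs are excluded.
def pvPreB (edges1 edges2 : List (List Int)) : Bool :=
  (List.range edges1.length).all fun n =>
    (List.range edges2.length).all fun m =>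
      (List.range ((edges2.getD m []).length - 1)).all fun k =>
        !(decide ((edges1.getD n []).length < k + 2)) ||
        ((List.range edges1.length).any fun n' =>
          (List.range edges2.length).any fun m' =>
            (List.range ((edges2.getD m' []).length - 1)).any fun k' =>
              (decide (n' < n) || (n' == n && (decide (m' < m) || (m' == m && decide (k' < k))))) &&
              pvMatchB edges1 edges2 n' m' k')

def Pre_check (edges1 : List (List Int)) (edges2 : List (List Int)) : Prop :=
  pvPreB edges1 edges2 = true
instance (edges1 : List (List Int)) (edges2 : List (List Int)) : Decidable (Pre_check edges1 edges2) := by unfold Pre_check; infer_instance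

def pvWitness_check : List (List Int) × List (List Int) := ([[1, 2], [3]], [[2, 1]])

def Spec_check (edges1 : List (List Int)) (edges2 : List (List Int)) (out : Bool) : Prop := out = check_alt edges1 edges2
instance (edges1 : List (List Int)) (edges2 : List (List Int)) (out : Bool) : Decidable (Spec_check edges1 edges2 out) := by unfold Spec_check; infer_instance

-- ===== CLAIM (what is proved, stated in full; the proofs are below) =====
def Claim_equal_check : Prop := ∀ (edges1 : List (List Int)) (edges2 : List (List Int)), Dom_check edges1 edges2 → Pre_check edges1 edges2 → Spec_check edges1 edges2 (check edges1 edges2)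


-- ===== LEMMAS AND PROOFS =====

-- membership in the inner fold of two `add`s
theorem mem_inner_fold {x : Nat × Int × Int} (f g : Nat → Nat × Int × Int) :
    ∀ (ks : List Nat) (s : PySem.Set (Nat × Int × Int)),
      (x ∈ ks.foldl (fun s k => PySem.Set.add (PySem.Set.add s (f k)) (g k)) s) ↔
        x ∈ s ∨ ∃ k ∈ ks, x = f k ∨ x = g k := by
  intro ks
  induction ks with
  | nil => simp
  | cons k ks ih =>
    intro s
    simp only [List.foldl_cons, ih, PySem.Set.mem_add, List.mem_cons]
    constructor
    · rintro (((h | h) | h) | ⟨k', hk', h⟩)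
      · exact Or.inl h
      · exact Or.inr ⟨k, Or.inl rfl, Or.inl h⟩
      · exact Or.inr ⟨k, Or.inl rfl, Or.inr h⟩
      · exact Or.inr ⟨k', Or.inr hk', h⟩
    · rintro (h | ⟨k', (rfl | hk'), h⟩)
      · exact Or.inl (Or.inl (Or.inl h))
      · rcases h with h | h
        · exact Or.inl (Or.inl (Or.inr h))
        · exact Or.inl (Or.inr h)
      · exact Or.inr ⟨k', hk', h⟩

theorem mem_pvPairs {x : Nat × Int × Int} (edges1 : List (List Int)) :
    x ∈ pvPairs edges1 ↔
      ∃ e ∈ edges1, ∃ k, k < e.length - 1 ∧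
        (x = (k, e.getD k 0, e.getD (k+1) 0) ∨ x = (k, e.getD (k+1) 0, e.getD k 0)) := by
  unfold pvPairs
  have step : ∀ (l : List (List Int)) (s : PySem.Set (Nat × Int × Int)),
      (x ∈ l.foldl (fun s e =>
        (List.range (e.length - 1)).foldl (fun s k =>
          PySem.Set.add (PySem.Set.add s (k, e.getD k 0, e.getD (k+1) 0))
            (k, e.getD (k+1) 0, e.getD k 0)) s) s) ↔
        x ∈ s ∨ ∃ e ∈ l, ∃ k, k < e.length - 1 ∧
          (x = (k, e.getD k 0, e.getD (k+1) 0) ∨ x = (k, e.getD (k+1) 0, e.getD k 0)) := by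
    intro l
    induction l with
    | nil => simp
    | cons e l ih =>
      intro s
      rw [List.foldl_cons, ih,
        mem_inner_fold (fun k => (k, e.getD k 0, e.getD (k+1) 0))
          (fun k => (k, e.getD (k+1) 0, e.getD k 0))]
      simp only [List.mem_range, List.mem_cons]
      constructor
      · rintro ((h | ⟨k, hk, h⟩) | ⟨e', he', h⟩)
        · exact Or.inl h
        · exact Or.inr ⟨e, Or.inl rfl, k, hk, h⟩
        · exact Or.inr ⟨e', Or.inr he', h⟩
      · rintro (h | ⟨e', (rfl | he'), h⟩)
        · exact Or.inl (Or.inl h)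
        · exact Or.inl (Or.inr h)
        · exact Or.inr ⟨e', he', h⟩
  rw [step]
  simp [PySem.Set.empty]

-- ∃ over an index range with getD = ∃ over the members
theorem exists_getD_iff {α : Type} (l : List α) (d : α) (P : α → Prop) :
    (∃ n, n < l.length ∧ P (l.getD n d)) ↔ ∃ x ∈ l, P x := by
  constructor
  · rintro ⟨n, hn, h⟩
    exact ⟨l[n], List.getElem_mem hn, by rwa [List.getD_eq_getElem l d hn] at h⟩
  · rintro ⟨x, hx, h⟩
    obtain ⟨n, hn, rfl⟩ := List.mem_iff_getElem.mp hx
    exact ⟨n, hn, by rwa [List.getD_eq_getElem l d hn]⟩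

theorem check_eq_true_iff (edges1 edges2 : List (List Int)) :
    check edges1 edges2 = true ↔
      ∃ n, n < edges1.length ∧ ∃ m, m < edges2.length ∧
        ∃ k, k < (edges2.getD m []).length - 1 ∧
        (((edges2.getD m []).getD k 0 = (edges1.getD n []).getD k 0 ∧
            (edges2.getD m []).getD (k+1) 0 = (edges1.getD n []).getD (k+1) 0) ∨
         ((edges2.getD m []).getD k 0 = (edges1.getD n []).getD (k+1) 0 ∧
            (edges2.getD m []).getD (k+1) 0 = (edges1.getD n []).getD k 0)) := by
  unfold check
  simp only [List.any_eq_true, List.mem_range, Bool.or_eq_true, Bool.and_eq_true, beq_iff_eq]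

theorem check_alt_eq_true_iff (edges1 edges2 : List (List Int)) :
    check_alt edges1 edges2 = true ↔
      ∃ b ∈ edges2, ∃ k, k < b.length - 1 ∧
        (k, b.getD k 0, b.getD (k+1) 0) ∈ pvPairs edges1 := by
  unfold check_alt
  simp only [List.any_eq_true, List.mem_range, PySem.Set.contains_iff]

-- any valid match (in the index form of pvMatchB) makes B's port return true
theorem alt_of_match (edges1 edges2 : List (List Int)) (n m k : Nat)
    (hn : n < edges1.length) (hm : m < edges2.length)
    (hk : k < (edges2.getD m []).length - 1)
    (hmatch : pvMatchB edges1 edges2 n m k = true) : check_alt edges1 edges2 = true := by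
  unfold pvMatchB at hmatch
  simp only [Bool.and_eq_true, Bool.or_eq_true, beq_iff_eq, decide_eq_true_eq] at hmatch
  obtain ⟨hlen, heq⟩ := hmatch
  rw [check_alt_eq_true_iff]
  refine ⟨edges2.getD m [], ?_, k, hk, (mem_pvPairs edges1).mpr
    ⟨edges1.getD n [], ?_, k, by omega, ?_⟩⟩
  · rw [List.getD_eq_getElem edges2 [] hm]; exact List.getElem_mem hm
  · rw [List.getD_eq_getElem edges1 [] hn]; exact List.getElem_mem hn
  · rcases heq with ⟨h1, h2⟩ | ⟨h1, h2⟩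
    · exact Or.inl (by rw [h1, h2])
    · exact Or.inr (by rw [h1, h2])

theorem check_spec' (edges1 edges2 : List (List Int))
    (hpre : Pre_check edges1 edges2) : check edges1 edges2 = check_alt edges1 edges2 := by
  rw [Bool.eq_iff_iff, check_eq_true_iff, check_alt_eq_true_iff]
  constructor
  · rintro ⟨n, hn, m, hm, k, hk, heq⟩
    by_cases hlen : k + 1 < (edges1.getD n []).length
    · have hmatch : pvMatchB edges1 edges2 n m k = true := by
        unfold pvMatchB
        simp only [Bool.and_eq_true, Bool.or_eq_true, beq_iff_eq, decide_eq_true_eq]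
        exact ⟨hlen, heq⟩
      rw [← check_alt_eq_true_iff]
      exact alt_of_match edges1 edges2 n m k hn hm hk hmatch
    · unfold Pre_check pvPreB at hpre
      simp only [List.all_eq_true, List.any_eq_true, List.mem_range, Bool.or_eq_true,
        Bool.and_eq_true, Bool.not_eq_eq_eq_not, Bool.not_true, decide_eq_false_iff_not,
        decide_eq_true_eq, beq_iff_eq] at hpre
      rcases hpre n hn m hm k hk with hlen' | ⟨n', hn', m', hm', k', hk', _, hmatch⟩
      · omega
      rw [← check_alt_eq_true_iff]
      exact alt_of_match edges1 edges2 n' m' k' hn' hm' hk' hmatch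
  · rintro ⟨b, hb, k, hk, hmem⟩
    obtain ⟨a, ha, k', hk'len, h⟩ := (mem_pvPairs edges1).mp hmem
    obtain ⟨n, hn, hna⟩ := (exists_getD_iff edges1 [] (· = a)).mpr ⟨a, ha, rfl⟩
    obtain ⟨m, hm, hmb⟩ := (exists_getD_iff edges2 [] (· = b)).mpr ⟨b, hb, rfl⟩
    refine ⟨n, hn, m, hm, k, by rw [hmb]; exact hk, ?_⟩
    rw [hna, hmb]
    rcases h with h | h <;> injection h with h1 h2 <;> subst h1 <;>
      injection h2 with h2 h3
    · exact Or.inl ⟨h2, h3⟩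
    · exact Or.inr ⟨h2, h3⟩

-- ===== VERDICT (by name: the statements are the Claim_ definitions above) =====
theorem check_spec : Claim_equal_check := by
  intro edges1 edges2 _ hpre
  exact check_spec' edges1 edges2 hpre
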